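-- pv_equiv track=rewrite | github.com/teddy4445/dna_property_finder | main.py | generate_sequence_from_number
-- ===== SOURCE A (Python) =====
-- def generate_sequence_from_number(index: int) -> str:
--     letters = ["A", "T", "C", "G"]
--     seq = []
--     # edge - case
--     if index == 0:
--         return 'A'
--     while index != 0:
--         seq.append(letters[int(index % 4)])
--         index = int(index / 4)
--     return ''.join(seq)
-- ===== SOURCE B (Python) =====
-- def generate_sequence_from_number(index: int) -> str:
--     if index == 0:
--         return 'A'
--
--     def rec(n: int) -> str:
--         if n == 0:
--             return ''
--         return "ATCG"[int(n % 4)] + rec(int(n / 4))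
--
--     return rec(index)
-- ===== Notes on version B (the rewrite author's own statement) =====
-- stated objective: alternative
-- what changed: Replaces the while loop that appends letters to a list and joins them with a direct recursion that indexes a letter string and concatenates the recursive tail, with no accumulator list or join.
import Mathlib
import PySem

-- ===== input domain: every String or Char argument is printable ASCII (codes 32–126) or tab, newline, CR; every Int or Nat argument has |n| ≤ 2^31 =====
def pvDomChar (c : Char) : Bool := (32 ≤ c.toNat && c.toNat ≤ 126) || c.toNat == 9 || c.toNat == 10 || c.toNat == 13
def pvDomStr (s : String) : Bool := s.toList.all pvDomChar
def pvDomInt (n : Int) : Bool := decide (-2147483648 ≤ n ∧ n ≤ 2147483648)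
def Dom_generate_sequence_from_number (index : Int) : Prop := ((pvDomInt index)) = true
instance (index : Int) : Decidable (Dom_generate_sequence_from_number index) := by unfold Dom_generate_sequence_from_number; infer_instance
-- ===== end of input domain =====

-- B replaces A's while-loop + list accumulator + join with a direct recursion over the digits; same values everywhere.

-- termination helper for both recursions (cited by decreasing_by)
theorem pv_truncdiv4_natAbs_lt (n : Int) (h : n ≠ 0) :
    (PySem.Int.truncdiv n 4).natAbs < n.natAbs := by
  have h4 : (PySem.Int.truncdiv n 4) = Int.tdiv n 4 := rfl
  rw [h4, Int.natAbs_tdiv]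
  exact Nat.div_lt_self (by omega) (by norm_num)

-- ===== PORT A =====
-- the while loop, carrying the growing `seq`; `int(index % 4)` = PySem.Int.mod (already an int),
-- `int(index / 4)` = PySem.Int.truncdiv (exact: |index| ≤ 2^31 < 2^53)
def pvLoopA (index : Int) (seq : List String) : List String :=
  if index = 0 then seq
  else pvLoopA (PySem.Int.truncdiv index 4)
        (seq ++ [(PySem.List.pyGet? ["A", "T", "C", "G"] (PySem.Int.mod index 4)).getD ""])
termination_by index.natAbs
decreasing_by exact pv_truncdiv4_natAbs_lt _ (by assumption)

def generate_sequence_from_number (index : Int) : String :=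
  if index = 0 then "A" else String.join (pvLoopA index [])

-- ===== PORT B =====
-- rec(n): '' when n == 0, else "ATCG"[n % 4] + rec(int(n / 4))
def pvRecB (n : Int) : String :=
  if n = 0 then ""
  else String.singleton ((PySem.Str.pyGet? "ATCG" (PySem.Int.mod n 4)).getD 'A')
        ++ pvRecB (PySem.Int.truncdiv n 4)
termination_by n.natAbs
decreasing_by exact pv_truncdiv4_natAbs_lt _ (by assumption)

def generate_sequence_from_number_alt (index : Int) : String :=
  if index = 0 then "A" else pvRecB index

-- ===== PRECONDITION & SPEC =====
def Spec_generate_sequence_from_number (index : Int) (out : String) : Prop := out = generate_sequence_from_number_alt index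
instance (index : Int) (out : String) : Decidable (Spec_generate_sequence_from_number index out) := by unfold Spec_generate_sequence_from_number; infer_instance

-- ===== CLAIM (what is proved, stated in full; the proofs are below) =====
def Claim_equal_generate_sequence_from_number : Prop := ∀ (index : Int), Dom_generate_sequence_from_number index → Spec_generate_sequence_from_number index (generate_sequence_from_number index)

-- ===== LEMMAS AND PROOFS =====

theorem pv_join_append (l : List String) (x : String) :
    String.join (l ++ [x]) = String.join l ++ x := by
  simp [String.join]

-- the letter A picks from its list equals the letter B picks from its string
theorem pv_letter_eq (n : Int) :
    (PySem.List.pyGet? ["A", "T", "C", "G"] (PySem.Int.mod n 4)).getD "" =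
      String.singleton ((PySem.Str.pyGet? "ATCG" (PySem.Int.mod n 4)).getD 'A') := by
  have h0 : 0 ≤ PySem.Int.mod n 4 := PySem.Int.mod_nonneg n (by norm_num)
  have h4 : PySem.Int.mod n 4 < 4 := PySem.Int.mod_lt n (by norm_num)
  set r := PySem.Int.mod n 4 with hr
  interval_cases r <;> decide

-- loop invariant: joining the loop's final list = joined accumulator ++ B's recursion
theorem pv_loop_eq_rec (n : Int) (seq : List String) :
    String.join (pvLoopA n seq) = String.join seq ++ pvRecB n := by
  by_cases h : n = 0
  · simp [h, pvLoopA, pvRecB]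
  · rw [pvLoopA, pvRecB, if_neg h, if_neg h,
      pv_loop_eq_rec (PySem.Int.truncdiv n 4), pv_join_append, pv_letter_eq,
      String.append_assoc]
termination_by n.natAbs
decreasing_by exact pv_truncdiv4_natAbs_lt _ h

-- ===== VERDICT (by name: the statement is the Claim_ definition above) =====
theorem generate_sequence_from_number_spec : Claim_equal_generate_sequence_from_number := by
  intro index _
  unfold Spec_generate_sequence_from_number generate_sequence_from_number generate_sequence_from_number_alt
  by_cases h : index = 0
  · simp [h]
  · rw [if_neg h, if_neg h, pv_loop_eq_rec]
    simp [String.join]
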